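-- pv_equiv track=rewrite | github.com/DevilPaddy/AquaHumanizer | format_preserver.py | normalize_line_breaks
-- ===== SOURCE A (Python) =====
-- def normalize_line_breaks(text: str) -> str:
--     """
--     Normalize line breaks to ensure consistency.
--     - Preserves intentional blank lines
--     - Removes excessive blank lines (more than 2)
--     - Maintains paragraph structure
--     """
--     # Split into lines
--     lines = text.split('\n')
--
--     # Process lines
--     normalized = []
--     prev_empty = False
--     empty_count = 0
--
--     for line in lines:
--         stripped = line.strip()
--
--         if not stripped:
--             # Empty line
--             empty_count += 1
--             if empty_count <= 2:  # Allow max 2 consecutive empty lines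
--                 normalized.append('')
--                 prev_empty = True
--         else:
--             # Non-empty line
--             normalized.append(stripped)
--             prev_empty = False
--             empty_count = 0
--
--     # Join back
--     return '\n'.join(normalized)
-- ===== SOURCE B (Python) =====
-- def normalize_line_breaks(text: str) -> str:
--     # Group-first strategy: strip all lines, then walk maximal runs of
--     # blank / non-blank lines; a blank run contributes min(len, 2) empties.
--     stripped = [ln.strip() for ln in text.split('\n')]
--     out = []
--     i = 0
--     n = len(stripped)
--     while i < n:
--         j = i
--         if stripped[i]:
--             while j < n and stripped[j]:
--                 j += 1
--             out.extend(stripped[i:j])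
--         else:
--             while j < n and not stripped[j]:
--                 j += 1
--             out.extend([''] * min(j - i, 2))
--         i = j
--     return '\n'.join(out)
-- ===== Notes on version B (the rewrite author's own statement) =====
-- stated objective: alternative
-- what changed: Replaces A's per-line running blank counter with a group-first pass: strip every line, split the line list into maximal blank/non-blank runs, emit min(run_length, 2) empties per blank run and the stripped lines per non-blank run, then join.
import Mathlib
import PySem

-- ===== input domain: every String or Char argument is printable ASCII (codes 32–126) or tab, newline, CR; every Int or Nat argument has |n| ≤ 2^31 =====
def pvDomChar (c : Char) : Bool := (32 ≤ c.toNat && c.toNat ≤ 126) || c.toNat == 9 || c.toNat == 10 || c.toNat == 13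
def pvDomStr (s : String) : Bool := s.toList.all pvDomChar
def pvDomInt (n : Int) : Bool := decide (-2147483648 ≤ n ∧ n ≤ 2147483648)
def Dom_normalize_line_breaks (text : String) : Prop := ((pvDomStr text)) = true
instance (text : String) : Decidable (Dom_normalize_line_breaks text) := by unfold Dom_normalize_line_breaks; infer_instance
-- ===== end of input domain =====

-- B replaces A's per-line blank counter with a group-first pass over maximal blank/non-blank
-- runs of stripped lines (alternative decomposition, same cost).

-- ===== PORT A =====
-- state = (normalized, prev_empty, empty_count): exactly A's loop variables
def normalize_line_breaks (text : String) : String :=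
  PySem.Str.join "\n"
    (((((PySem.Str.split? text "\n").getD [])).foldl
      (fun (st : List String × Bool × Nat) line =>
        if PySem.Str.strip line = "" then
          if st.2.2 + 1 ≤ 2 then (st.1 ++ [""], true, st.2.2 + 1)
          else (st.1, st.2.1, st.2.2 + 1)
        else (st.1 ++ [PySem.Str.strip line], false, 0))
      ([], false, 0)).1)

-- ===== PORT B =====
-- Source B's inner while-scans over the stripped lines become takeWhile/dropWhile
def pvEmitRuns : List String → List String
  | [] => []
  | s :: rest =>
    if s = "" then
      List.replicate (min ((rest.takeWhile (· = "")).length + 1) 2) ""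
        ++ pvEmitRuns (rest.dropWhile (· = ""))
    else
      (s :: rest.takeWhile (· ≠ ""))
        ++ pvEmitRuns (rest.dropWhile (· ≠ ""))
  termination_by ls => ls.length
  decreasing_by
  all_goals
    simp only [List.length_cons, Nat.lt_succ_iff]
    apply List.length_dropWhile_le

def normalize_line_breaks_alt (text : String) : String :=
  PySem.Str.join "\n" (pvEmitRuns ((((PySem.Str.split? text "\n").getD [])).map PySem.Str.strip))

-- ===== PRECONDITION & SPEC =====
def Spec_normalize_line_breaks (text : String) (out : String) : Prop := out = normalize_line_breaks_alt text
instance (text : String) (out : String) : Decidable (Spec_normalize_line_breaks text out) := by unfold Spec_normalize_line_breaks; infer_instance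

-- ===== CLAIM (what is proved, stated in full; the proofs are below) =====
def Claim_equal_normalize_line_breaks : Prop := ∀ (text : String), Dom_normalize_line_breaks text → Spec_normalize_line_breaks text (normalize_line_breaks text)

-- ===== LEMMAS AND PROOFS =====

-- per-line view of A's counter loop, on already-stripped lines
def pvEmitC (c : Nat) : List String → List String
  | [] => []
  | s :: rest =>
    if s = "" then (if c + 1 ≤ 2 then [""] else []) ++ pvEmitC (c + 1) rest
    else s :: pvEmitC 0 rest

lemma pvFoldA_spec (ls : List String) :
    ∀ (acc : List String) (p : Bool) (c : Nat),
      (ls.foldl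
        (fun (st : List String × Bool × Nat) line =>
          if PySem.Str.strip line = "" then
            if st.2.2 + 1 ≤ 2 then (st.1 ++ [""], true, st.2.2 + 1)
            else (st.1, st.2.1, st.2.2 + 1)
          else (st.1 ++ [PySem.Str.strip line], false, 0))
        (acc, p, c)).1 = acc ++ pvEmitC c (ls.map PySem.Str.strip) := by
  induction ls with
  | nil => intro acc p c; simp [pvEmitC]
  | cons l t ih =>
    intro acc p c
    simp only [List.foldl_cons, List.map_cons]
    by_cases h : PySem.Str.strip l = ""
    · by_cases h2 : c + 1 ≤ 2
      · rw [if_pos h, if_pos h2, ih]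
        simp [pvEmitC, h, h2, List.append_assoc]
      · rw [if_pos h, if_neg h2, ih]
        simp [pvEmitC, h, h2]
    · rw [if_neg h, ih]
      simp [pvEmitC, h, List.append_assoc]

lemma pvDropWhile_head_false {α : Type} (p : α → Bool) (l : List α) :
    ∀ (x : α) (t : List α), l.dropWhile p = x :: t → p x = false := by
  induction l with
  | nil => intro x t h; simp [List.dropWhile] at h
  | cons a l ih =>
    intro x t h
    cases hpa : p a with
    | true => rw [List.dropWhile_cons_of_pos hpa] at h; exact ih x t h
    | false =>
      rw [List.dropWhile_cons_of_neg (by simp [hpa])] at h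
      injection h with h1 _
      subst h1; exact hpa

-- a non-blank (or absent) head makes the entering counter irrelevant
lemma pvEmitC_reset (c : Nat) (ls : List String)
    (h : ∀ (x : String) (t : List String), ls = x :: t → x ≠ "") :
    pvEmitC c ls = pvEmitC 0 ls := by
  cases ls with
  | nil => rfl
  | cons x t => simp [pvEmitC, h x t rfl]

-- a run of blank lines started with counter c
lemma pvEmitC_blank_run (run : List String) :
    ∀ (rest : List String) (c : Nat), (∀ s ∈ run, s = "") →
      pvEmitC c (run ++ rest)
        = List.replicate (min run.length (2 - min c 2)) "" ++ pvEmitC (c + run.length) rest := by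
  induction run with
  | nil => intro rest c _; simp
  | cons s t ih =>
    intro rest c hall
    have hs : s = "" := hall s (by simp)
    subst hs
    simp only [List.cons_append, pvEmitC]
    rw [ih rest (c + 1) (fun x hx => hall x (by simp [hx]))]
    have h1 : (if c + 1 ≤ 2 then [""] else ([] : List String))
        = List.replicate (if c + 1 ≤ 2 then 1 else 0) "" := by split <;> rfl
    rw [h1, ← List.append_assoc, ← List.replicate_add]
    have h2 : (if c + 1 ≤ 2 then 1 else 0) + min t.length (2 - min (c + 1) 2)
        = min ("" :: t).length (2 - min c 2) := by
      simp only [List.length_cons]; split <;> omega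
    rw [h2, show c + 1 + t.length = c + ("" :: t).length from by simp [List.length_cons]; omega]
    simp

-- a run of non-blank lines passes through and resets the counter
lemma pvEmitC_nonblank_run (run : List String) :
    ∀ (rest : List String) (c : Nat), (∀ s ∈ run, s ≠ "") →
      pvEmitC c (run ++ rest) = run ++ pvEmitC (if run.isEmpty then c else 0) rest := by
  induction run with
  | nil => intro rest c _; simp
  | cons s t ih =>
    intro rest c hall
    have hs : s ≠ "" := hall s (by simp)
    simp only [List.cons_append, pvEmitC, if_neg hs]
    rw [ih rest 0 (fun x hx => hall x (by simp [hx]))]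
    cases t <;> simp

lemma pvEmitC_eq_emitRuns (n : Nat) : ∀ (ls : List String), ls.length ≤ n →
    pvEmitC 0 ls = pvEmitRuns ls := by
  induction n with
  | zero =>
    intro ls h
    cases ls with
    | nil => simp [pvEmitC, pvEmitRuns]
    | cons a t => simp at h
  | succ n ih =>
    intro ls hlen
    cases ls with
    | nil => simp [pvEmitC, pvEmitRuns]
    | cons s rest =>
      by_cases hs : s = ""
      · subst hs
        rw [pvEmitRuns]
        conv_lhs =>
          rw [show rest = rest.takeWhile (· = "") ++ rest.dropWhile (· = "") from
            (List.takeWhile_append_dropWhile).symm]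
        rw [show ("" : String) :: (rest.takeWhile (· = "") ++ rest.dropWhile (· = ""))
              = (("" : String) :: rest.takeWhile (· = "")) ++ rest.dropWhile (· = "") from rfl]
        rw [pvEmitC_blank_run _ _ _ (by
          intro x hx
          rcases List.mem_cons.mp hx with h | h
          · exact h
          · simpa using List.mem_takeWhile_imp (p := fun y => decide (y = "")) h)]
        rw [pvEmitC_reset _ _ (by
          intro x t hxt
          have := pvDropWhile_head_false (fun s => decide (s = "")) rest x t hxt
          simpa using this)]
        rw [ih _ (by
          have := List.length_dropWhile_le (p := fun s => decide (s = "")) rest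
          simp only [List.length_cons] at hlen; omega)]
        simp [List.length_cons]
      · rw [pvEmitRuns]
        simp only [if_neg hs]
        conv_lhs =>
          rw [show rest = rest.takeWhile (· ≠ "") ++ rest.dropWhile (· ≠ "") from
            (List.takeWhile_append_dropWhile).symm]
        rw [show s :: (rest.takeWhile (· ≠ "") ++ rest.dropWhile (· ≠ ""))
              = (s :: rest.takeWhile (· ≠ "")) ++ rest.dropWhile (· ≠ "") from rfl]
        rw [pvEmitC_nonblank_run _ _ _ (by
          intro x hx
          rcases List.mem_cons.mp hx with h | h
          · subst h; exact hs
          · simpa using List.mem_takeWhile_imp (p := fun y => decide (y ≠ "")) h)]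
        simp only [List.isEmpty_cons, Bool.false_eq_true, if_false]
        rw [ih _ (by
          have := List.length_dropWhile_le (p := fun y => decide (y ≠ "")) rest
          simp only [List.length_cons] at hlen; omega)]

-- ===== VERDICT (by name: the statement is the Claim_ definition above) =====
theorem normalize_line_breaks_spec : Claim_equal_normalize_line_breaks := by
  intro text _
  unfold Spec_normalize_line_breaks normalize_line_breaks normalize_line_breaks_alt
  rw [pvFoldA_spec]
  rw [pvEmitC_eq_emitRuns ((((PySem.Str.split? text "\n").getD [])).map PySem.Str.strip).length _ (le_refl _)]
  simp
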